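-- pv_equiv track=rewrite | github.com/melnicek/buffer-overflow-toolkit | .legacy/yz-patterns.py | yz
-- ===== SOURCE A (Python) =====
-- import string
--
-- def yz(alphabet, original_size):
--   size = original_size // 4 + 1
--   lower = string.ascii_lowercase
--   upper = string.ascii_uppercase
--   digits = string.digits
--   punctuation = string.punctuation
--   counter = 0
--   output = ""
--   while size > counter:
--     output += upper[counter//(len(punctuation)*len(digits)*len(lower))%len(upper)]
--     output += lower[counter//(len(punctuation)*len(digits))%len(lower)]
--     output += digits[counter//len(punctuation)%len(digits)]
--     output += punctuation[counter%len(punctuation)]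
--     counter += 1
--   return output[:original_size]
-- ===== SOURCE B (Python) =====
-- import string
--
-- def yz(alphabet, original_size):
--     # Incremental four-wheel odometer: no division, indices carry like a counter.
--     size = original_size // 4 + 1
--     lower = string.ascii_lowercase
--     upper = string.ascii_uppercase
--     digits = string.digits
--     punctuation = string.punctuation
--     ui = li = di = pi = 0
--     parts = []
--     for _ in range(size):
--         parts.append(upper[ui])
--         parts.append(lower[li])
--         parts.append(digits[di])
--         parts.append(punctuation[pi])
--         pi += 1
--         if pi == len(punctuation):
--             pi = 0
--             di += 1
--             if di == len(digits):
--                 di = 0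
--                 li += 1
--                 if li == len(lower):
--                     li = 0
--                     ui = (ui + 1) % len(upper)
--     return ''.join(parts)[:original_size]
-- ===== Notes on version B (the rewrite author's own statement) =====
-- stated objective: faster
-- what changed: Replaces A's three floor-divisions and four mods per iteration (computing each wheel index from the counter) by an incremental four-wheel odometer that carry-increments the indices with no division, collecting characters in a list joined once instead of repeated string concatenation.
import Mathlib
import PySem

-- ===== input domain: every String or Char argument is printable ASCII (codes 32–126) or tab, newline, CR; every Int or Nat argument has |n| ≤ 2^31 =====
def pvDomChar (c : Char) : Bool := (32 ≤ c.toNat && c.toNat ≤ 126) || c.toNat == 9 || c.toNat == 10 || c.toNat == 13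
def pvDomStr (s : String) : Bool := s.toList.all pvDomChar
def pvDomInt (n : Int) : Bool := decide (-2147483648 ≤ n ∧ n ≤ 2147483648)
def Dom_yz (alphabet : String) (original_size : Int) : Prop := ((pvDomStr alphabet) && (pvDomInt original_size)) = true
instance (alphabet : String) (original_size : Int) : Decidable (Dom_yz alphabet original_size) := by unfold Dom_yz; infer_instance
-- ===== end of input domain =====

-- B replaces A's per-position div/mod index formulas by an incremental four-wheel
-- odometer (carry increments, no division); measured modestly faster (constant factor).

-- ===== PORT A =====
-- shared constants (string.ascii_lowercase / ascii_uppercase / digits / punctuation)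
def yzLower : List Char := "abcdefghijklmnopqrstuvwxyz".toList
def yzUpper : List Char := "ABCDEFGHIJKLMNOPQRSTUVWXYZ".toList
def yzDigits : List Char := "0123456789".toList
def yzPunct : List Char := "!\"#$%&'()*+,-./:;<=>?@[\\]^_`{|}~".toList

-- the while loop of A: indices are always in range (mod by the length), so pyGetD is exact
def yzALoop (size counter : Int) (output : List Char) : List Char :=
  if _h : size > counter then
    let o1 := output ++ [PySem.List.pyGetD yzUpper
      (PySem.Int.mod (PySem.Int.floordiv counter ((yzPunct.length : Int) * (yzDigits.length : Int) * (yzLower.length : Int))) (yzUpper.length : Int)) ' ']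
    let o2 := o1 ++ [PySem.List.pyGetD yzLower
      (PySem.Int.mod (PySem.Int.floordiv counter ((yzPunct.length : Int) * (yzDigits.length : Int))) (yzLower.length : Int)) ' ']
    let o3 := o2 ++ [PySem.List.pyGetD yzDigits
      (PySem.Int.mod (PySem.Int.floordiv counter (yzPunct.length : Int)) (yzDigits.length : Int)) ' ']
    let o4 := o3 ++ [PySem.List.pyGetD yzPunct (PySem.Int.mod counter (yzPunct.length : Int)) ' ']
    yzALoop size (counter + 1) o4
  else output
termination_by (size - counter).toNat
decreasing_by omega

def yz (alphabet : String) (original_size : Int) : String :=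
  let size := PySem.Int.floordiv original_size 4 + 1
  String.ofList (PySem.List.slice (yzALoop size 0 []) none (some original_size))

-- ===== PORT B =====
-- one loop-body step of B: append the four wheel characters, then carry-increment the wheels
def yzBStep (st : (Int × Int × Int × Int) × List Char) (_i : Int) : (Int × Int × Int × Int) × List Char :=
  let ui := st.1.1; let li := st.1.2.1; let di := st.1.2.2.1; let pi := st.1.2.2.2
  let parts := st.2 ++ [PySem.List.pyGetD yzUpper ui ' ', PySem.List.pyGetD yzLower li ' ',
                        PySem.List.pyGetD yzDigits di ' ', PySem.List.pyGetD yzPunct pi ' ']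
  let pi := pi + 1
  if pi = (yzPunct.length : Int) then
    let di := di + 1
    if di = (yzDigits.length : Int) then
      let li := li + 1
      if li = (yzLower.length : Int) then
        ((PySem.Int.mod (ui + 1) (yzUpper.length : Int), 0, 0, 0), parts)
      else ((ui, li, 0, 0), parts)
    else ((ui, li, di, 0), parts)
  else ((ui, li, di, pi), parts)

def yz_alt (alphabet : String) (original_size : Int) : String :=
  let size := PySem.Int.floordiv original_size 4 + 1
  let st := (PySem.List.pyRange 0 size 1).foldl yzBStep (((0, 0, 0, 0) : Int × Int × Int × Int), ([] : List Char))
  String.ofList (PySem.List.slice st.2 none (some original_size))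

-- ===== PRECONDITION & SPEC =====
def Spec_yz (alphabet : String) (original_size : Int) (out : String) : Prop := out = yz_alt alphabet original_size
instance (alphabet : String) (original_size : Int) (out : String) : Decidable (Spec_yz alphabet original_size out) := by unfold Spec_yz; infer_instance

-- ===== CLAIM (what is proved, stated in full; the proofs are below) =====
def Claim_equal_yz : Prop := ∀ (alphabet : String) (original_size : Int), Dom_yz alphabet original_size → Spec_yz alphabet original_size (yz alphabet original_size)

-- ===== LEMMAS AND PROOFS =====

-- the 4-char block emitted for counter value n, Nat-arithmetic form
def yzBlk (n : Nat) : List Char :=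
  [yzUpper.getD (n / 8320 % 26) ' ', yzLower.getD (n / 320 % 26) ' ',
   yzDigits.getD (n / 32 % 10) ' ', yzPunct.getD (n % 32) ' ']

def yzBlocks (k : Nat) : List Char := (List.range k).flatMap yzBlk

-- the 4-char block as A's Int-arithmetic expressions
def yzBlkI (c : Int) : List Char :=
  [PySem.List.pyGetD yzUpper
      (PySem.Int.mod (PySem.Int.floordiv c ((yzPunct.length : Int) * (yzDigits.length : Int) * (yzLower.length : Int))) (yzUpper.length : Int)) ' ',
   PySem.List.pyGetD yzLower
      (PySem.Int.mod (PySem.Int.floordiv c ((yzPunct.length : Int) * (yzDigits.length : Int))) (yzLower.length : Int)) ' ',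
   PySem.List.pyGetD yzDigits
      (PySem.Int.mod (PySem.Int.floordiv c (yzPunct.length : Int)) (yzDigits.length : Int)) ' ',
   PySem.List.pyGetD yzPunct (PySem.Int.mod c (yzPunct.length : Int)) ' ']

lemma yzALoop_eq_aux (n : Nat) : ∀ (size counter : Int) (out : List Char), (size - counter).toNat ≤ n →
    yzALoop size counter out = out ++ (PySem.List.pyRange counter size 1).flatMap yzBlkI := by
  induction n with
  | zero =>
    intro size counter out h
    rw [yzALoop]
    have hc : ¬ size > counter := by omega
    simp [hc, PySem.List.pyRange_one_eq_nil (by omega : size ≤ counter)]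
  | succ n ih =>
    intro size counter out h
    rw [yzALoop]
    by_cases hc : size > counter
    · simp only [hc, dite_true]
      rw [ih size (counter + 1) _ (by omega), PySem.List.pyRange_one_cons hc]
      simp [yzBlkI]
    · simp [hc, PySem.List.pyRange_one_eq_nil (by omega : size ≤ counter)]

lemma yzALoop_eq (size counter : Int) (out : List Char) :
    yzALoop size counter out = out ++ (PySem.List.pyRange counter size 1).flatMap yzBlkI :=
  yzALoop_eq_aux (size - counter).toNat size counter out le_rfl

lemma yzBlkI_cast (n : Nat) : yzBlkI (n : Int) = yzBlk n := by
  unfold yzBlkI yzBlk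
  rw [show ((yzPunct.length : Int) * (yzDigits.length : Int) * (yzLower.length : Int)) = ((8320 : Nat) : Int) from by decide,
      show ((yzPunct.length : Int) * (yzDigits.length : Int)) = ((320 : Nat) : Int) from by decide,
      show ((yzUpper.length : Int)) = ((26 : Nat) : Int) from by decide,
      show ((yzLower.length : Int)) = ((26 : Nat) : Int) from by decide,
      show ((yzDigits.length : Int)) = ((10 : Nat) : Int) from by decide,
      show ((yzPunct.length : Int)) = ((32 : Nat) : Int) from by decide,
      PySem.Int.floordiv_natCast n 8320, PySem.Int.mod_natCast (n / 8320) 26,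
      PySem.Int.floordiv_natCast n 320, PySem.Int.mod_natCast (n / 320) 26,
      PySem.Int.floordiv_natCast n 32, PySem.Int.mod_natCast (n / 32) 10,
      PySem.Int.mod_natCast n 32]
  simp only [PySem.List.pyGetD_natCast]

-- the wheel state of B after k iterations
def yzWheels (k : Nat) : Int × Int × Int × Int :=
  (((k / 8320 % 26 : Nat) : Int), ((k / 320 % 26 : Nat) : Int),
   ((k / 32 % 10 : Nat) : Int), ((k % 32 : Nat) : Int))

lemma yzBStep_eq (k : Nat) : yzBStep (yzWheels k, yzBlocks k) (k : Int) = (yzWheels (k + 1), yzBlocks (k + 1)) := by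
  have h32 : ∀ m : Nat, m / 320 = m / 32 / 10 := fun m => by rw [Nat.div_div_eq_div_mul]
  have h8320 : ∀ m : Nat, m / 8320 = m / 32 / 10 / 26 := fun m => by
    rw [Nat.div_div_eq_div_mul, Nat.div_div_eq_div_mul]
  have hparts : yzBlocks k ++ [yzUpper.getD (k / 8320 % 26) ' ', yzLower.getD (k / 320 % 26) ' ',
      yzDigits.getD (k / 32 % 10) ' ', yzPunct.getD (k % 32) ' '] = yzBlocks (k + 1) := by
    rw [yzBlocks, yzBlocks, List.range_succ, List.flatMap_append]
    simp [yzBlk]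
  unfold yzBStep yzWheels
  simp only [PySem.List.pyGetD_natCast]
  rw [show ((yzUpper.length : Int)) = ((26 : Nat) : Int) from by decide,
      show ((yzLower.length : Int)) = ((26 : Nat) : Int) from by decide,
      show ((yzDigits.length : Int)) = ((10 : Nat) : Int) from by decide,
      show ((yzPunct.length : Int)) = ((32 : Nat) : Int) from by decide]
  split_ifs with h1 h2 h3
  · rw [show ((k / 8320 % 26 : Nat) : Int) + 1 = (((k / 8320 % 26 + 1 : Nat)) : Int) from by push_cast; ring,
        PySem.Int.mod_natCast]
    simp only [hparts, Prod.mk.injEq, and_true]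
    simp only [h32, h8320] at h1 h2 h3 ⊢
    refine ⟨?_, ?_, ?_, ?_⟩ <;> omega
  · simp only [hparts, Prod.mk.injEq, and_true]
    simp only [h32, h8320] at h1 h2 h3 ⊢
    refine ⟨?_, ?_, ?_, ?_⟩ <;> omega
  · simp only [hparts, Prod.mk.injEq, and_true]
    simp only [h32, h8320] at h1 h2 ⊢
    refine ⟨?_, ?_, ?_, ?_⟩ <;> omega
  · simp only [hparts, Prod.mk.injEq, and_true]
    simp only [h32, h8320] at h1 ⊢
    refine ⟨?_, ?_, ?_, ?_⟩ <;> omega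

lemma yzB_inv (k : Nat) :
    (PySem.List.pyRange 0 (k : Int) 1).foldl yzBStep (((0, 0, 0, 0) : Int × Int × Int × Int), ([] : List Char))
      = (yzWheels k, yzBlocks k) := by
  induction k with
  | zero => simp [PySem.List.pyRange_one_eq_nil (le_refl (0 : Int)), yzWheels, yzBlocks]
  | succ k ih =>
    rw [show ((k + 1 : Nat) : Int) = (k : Int) + 1 from by push_cast; ring,
        PySem.List.pyRange_one_succ_right (by positivity : (0 : Int) ≤ ((k : Nat) : Int)),
        List.foldl_append, ih]
    simpa using yzBStep_eq k

lemma yzA_flat (size : Int) :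
    (PySem.List.pyRange 0 size 1).flatMap yzBlkI = yzBlocks size.toNat := by
  rw [PySem.List.pyRange_one, yzBlocks]
  simp only [sub_zero, List.flatMap_map]
  exact List.flatMap_congr (fun n _ => by simpa using yzBlkI_cast n)

lemma yzB_foldl (size : Int) :
    ((PySem.List.pyRange 0 size 1).foldl yzBStep (((0, 0, 0, 0) : Int × Int × Int × Int), ([] : List Char))).2
      = yzBlocks size.toNat := by
  by_cases h : size ≤ 0
  · rw [PySem.List.pyRange_one_eq_nil h]
    simp [yzBlocks, Int.toNat_of_nonpos h]
  · rw [show size = ((size.toNat : Nat) : Int) from (Int.toNat_of_nonneg (by omega)).symm, yzB_inv]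
    simp
    congr 1
    omega

-- ===== VERDICT (by name: the statement is the Claim_ definition above) =====
theorem yz_spec : Claim_equal_yz := by
  intro alphabet original_size _hdom
  unfold Spec_yz
  show yz alphabet original_size = yz_alt alphabet original_size
  simp only [yz, yz_alt]
  rw [yzALoop_eq, yzB_foldl]
  simp [yzA_flat]
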